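-- pv_equiv track=rewrite | github.com/tselisonapo-ops/finsage | BackEnd/Services/reporting/tb_helpers.py | _num_from_code
-- ===== SOURCE A (Python) =====
-- def _num_from_code(code: str) -> int:
--     """Extract last integer found in code like 'BS_CA_1000' or '1000'."""
--     if not code:
--         return -1
--     digits = ""
--     for ch in reversed(str(code).strip()):
--         if ch.isdigit():
--             digits = ch + digits
--         elif digits:
--             break
--     return int(digits) if digits else -1
-- ===== SOURCE B (Python) =====
-- def _num_from_code(code: str) -> int:
--     """Extract last integer found in code like 'BS_CA_1000' or '1000'."""
--     if not code:
--         return -1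
--     groups = []
--     cur = ""
--     for ch in str(code).strip():
--         if ch.isdigit():
--             cur += ch
--         elif cur:
--             groups.append(cur)
--             cur = ""
--     if cur:
--         groups.append(cur)
--     return int(groups[-1]) if groups else -1
-- ===== Notes on version B (the rewrite author's own statement) =====
-- stated objective: alternative
-- what changed: Replaces the backward character scan with early break by a single forward pass that collects every maximal digit group and then selects the last one.
import Mathlib
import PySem

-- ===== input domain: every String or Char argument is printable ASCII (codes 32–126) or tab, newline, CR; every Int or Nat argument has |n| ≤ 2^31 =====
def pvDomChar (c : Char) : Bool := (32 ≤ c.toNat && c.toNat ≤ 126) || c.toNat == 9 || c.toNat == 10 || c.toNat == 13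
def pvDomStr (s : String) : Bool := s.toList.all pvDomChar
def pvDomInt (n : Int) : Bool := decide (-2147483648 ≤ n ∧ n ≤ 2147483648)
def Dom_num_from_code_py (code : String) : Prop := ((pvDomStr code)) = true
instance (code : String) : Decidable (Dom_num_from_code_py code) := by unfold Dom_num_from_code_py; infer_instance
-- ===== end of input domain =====

-- B replaces A's backward scan with an early break by a forward pass that collects all
-- maximal digit groups and selects the last (alternative decomposition, same cost).

-- ===== PORT A =====
-- the 'for ch in reversed(...)' loop: state is the string 'digits' (as a char list in
-- original order, since 'digits = ch + digits' prepends); 'break' = return the state.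
def numLoopA : List Char → List Char → List Char
  | [], digits => digits
  | ch :: rest, digits =>
    if PySem.Chars.isdigit ch then numLoopA rest (ch :: digits)
    else if digits ≠ [] then digits
    else numLoopA rest digits

def num_from_code_py (code : String) : Int :=
  if code = "" then -1                       -- 'if not code'
  else
    let digits := numLoopA (PySem.Str.strip code).toList.reverse []
    -- int(digits) never raises here: digits is a nonempty all-digit string, so
    -- PySem.Int.ofChars? is 'some'; getD (-1) is only for totality.
    if digits = [] then -1 else (PySem.Int.ofChars? digits).getD (-1)

-- ===== PORT B =====
-- the forward loop of Source B: state (groups, cur); after the loop a trailing cur is flushed.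
def numGroupsB : List Char → List Char → List (List Char)
  | [], cur => if cur = [] then [] else [cur]
  | ch :: rest, cur =>
    if PySem.Chars.isdigit ch then numGroupsB rest (cur ++ [ch])
    else if cur = [] then numGroupsB rest []
    else cur :: numGroupsB rest []

def num_from_code_py_alt (code : String) : Int :=
  if code = "" then -1
  else
    match (numGroupsB (PySem.Str.strip code).toList []).getLast? with   -- groups[-1]
    | some g => (PySem.Int.ofChars? g).getD (-1)                        -- int(groups[-1])
    | none => -1

-- ===== PRECONDITION & SPEC =====
def Spec_num_from_code_py (code : String) (out : Int) : Prop := out = num_from_code_py_alt code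
instance (code : String) (out : Int) : Decidable (Spec_num_from_code_py code out) := by unfold Spec_num_from_code_py; infer_instance

-- ===== CLAIM (what is proved, stated in full; the proofs are below) =====
def Claim_equal_num_from_code_py : Prop := ∀ (code : String), Dom_num_from_code_py code → Spec_num_from_code_py code (num_from_code_py code)

-- ===== LEMMAS AND PROOFS =====

-- A's loop with a nonempty accumulator just keeps taking digits.
theorem numLoopA_acc (rest : List Char) : ∀ d : List Char, d ≠ [] →
    numLoopA rest d = (rest.takeWhile PySem.Chars.isdigit).reverse ++ d := by
  induction rest with
  | nil => intro d _; simp [numLoopA]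
  | cons c rest ih =>
    intro d hd
    by_cases hc : PySem.Chars.isdigit c = true
    · simp [numLoopA, hc, ih (c :: d) (by simp), List.takeWhile_cons, List.append_assoc]
    · simp [numLoopA, hc, hd, List.takeWhile_cons]

-- closed form for A's whole loop: skip non-digits, then the first digit run, reversed.
theorem numLoopA_closed (r : List Char) :
    numLoopA r [] =
      ((r.dropWhile (fun c => !PySem.Chars.isdigit c)).takeWhile PySem.Chars.isdigit).reverse := by
  induction r with
  | nil => simp [numLoopA]
  | cons c rest ih =>
    by_cases hc : PySem.Chars.isdigit c = true
    · simp [numLoopA, hc, numLoopA_acc rest [c] (by simp), List.dropWhile_cons,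
        List.takeWhile_cons]
    · simp [numLoopA, hc, ih, List.dropWhile_cons]

-- every group B collects is nonempty.
theorem numGroupsB_ne_nil (l : List Char) : ∀ cur g, g ∈ numGroupsB l cur → g ≠ [] := by
  induction l with
  | nil =>
    intro cur g hg
    by_cases hcur : cur = [] <;> simp [numGroupsB, hcur] at hg <;> simp_all
  | cons c rest ih =>
    intro cur g hg
    by_cases hc : PySem.Chars.isdigit c = true
    · exact ih _ _ (by simpa [numGroupsB, hc] using hg)
    · by_cases hcur : cur = []
      · exact ih _ _ (by simpa [numGroupsB, hc, hcur] using hg)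
      · simp [numGroupsB, hc, hcur] at hg
        rcases hg with h | h
        · simp [h, hcur]
        · exact ih _ _ h

-- B collects no group iff the current run is empty and no digit remains.
theorem numGroupsB_eq_nil_iff (l : List Char) : ∀ cur,
    numGroupsB l cur = [] ↔ (cur = [] ∧ ∀ c ∈ l, PySem.Chars.isdigit c = false) := by
  induction l with
  | nil => intro cur; by_cases hcur : cur = [] <;> simp [numGroupsB, hcur]
  | cons c rest ih =>
    intro cur
    by_cases hc : PySem.Chars.isdigit c = true
    · simp [numGroupsB, hc, ih]
    · rw [Bool.not_eq_true] at hc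
      by_cases hcur : cur = []
      · subst hcur
        simp [numGroupsB, hc, ih, List.forall_mem_cons]
      · simp [numGroupsB, hc, hcur]

-- appending a non-digit and then an all-digit tail behind a list that already
-- contains a digit does not change "first digit run after skipping non-digits".
theorem tw_dw_append (x z : List Char) (c : Char)
    (hc : PySem.Chars.isdigit c = false)
    (hx : x.dropWhile (fun c => !PySem.Chars.isdigit c) ≠ []) :
    ((x ++ c :: z).dropWhile (fun c => !PySem.Chars.isdigit c)).takeWhile PySem.Chars.isdigit
      = (x.dropWhile (fun c => !PySem.Chars.isdigit c)).takeWhile PySem.Chars.isdigit := by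
  rw [List.dropWhile_append]
  simp only [List.isEmpty_iff, hx, if_false]
  rw [List.takeWhile_append]
  split
  · rename_i hlen
    have hpre := List.takeWhile_prefix (l := x.dropWhile (fun c => !PySem.Chars.isdigit c))
      (p := PySem.Chars.isdigit)
    have := hpre.eq_of_length hlen
    simp [List.takeWhile_cons, hc, this]
  · rfl

-- main characterization of B: the last collected group equals the reversed first digit
-- run of the reversed remaining input (with the pending run appended behind it).
theorem numGroupsB_last (l : List Char) : ∀ cur, (∀ c ∈ cur, PySem.Chars.isdigit c = true) →
    ((numGroupsB l cur).getLast?.getD [] : List Char) =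
      (((l.reverse ++ cur.reverse).dropWhile (fun c => !PySem.Chars.isdigit c)).takeWhile
        PySem.Chars.isdigit).reverse := by
  induction l with
  | nil =>
    intro cur hcur
    have hdw : cur.reverse.dropWhile (fun c => !PySem.Chars.isdigit c) = cur.reverse := by
      cases h : cur.reverse with
      | nil => simp
      | cons a t =>
        have ha : a ∈ cur := by
          have : a ∈ cur.reverse := by simp [h]
          simpa using this
        simp [List.dropWhile_cons, hcur a ha]
    have htw : cur.reverse.takeWhile PySem.Chars.isdigit = cur.reverse := by
      rw [List.takeWhile_eq_self_iff]
      intro a ha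
      exact hcur a (by simpa using ha)
    by_cases hcurn : cur = [] <;> simp [numGroupsB, hcurn, hdw, htw]
  | cons c rest ih =>
    intro cur hcur
    by_cases hc : PySem.Chars.isdigit c = true
    · have h := ih (cur ++ [c]) (fun a ha => by
        rcases List.mem_append.1 ha with h' | h'
        · exact hcur a h'
        · simp at h'; simpa [h'] using hc)
      simpa [numGroupsB, hc, List.reverse_append, List.append_assoc] using h
    · by_cases hcurn : cur = []
      · subst hcurn
        have h := ih [] (by simp)
        simp only [List.reverse_nil, List.append_nil] at h
        rw [show numGroupsB (c :: rest) [] = numGroupsB rest [] from by simp [numGroupsB, hc],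
          show ((c :: rest).reverse ++ ([] : List Char).reverse) = rest.reverse ++ [c] from by simp]
        rw [h]
        by_cases hall : ∀ a ∈ rest.reverse, (fun c => !PySem.Chars.isdigit c) a = true
        · rw [List.dropWhile_append]
          simp [List.dropWhile_eq_nil_iff.2 hall, List.dropWhile_eq_nil_iff.2 hall,
            List.dropWhile_cons, hc]
        · have hne : rest.reverse.dropWhile (fun c => !PySem.Chars.isdigit c) ≠ [] := by
            simpa [List.dropWhile_eq_nil_iff] using hall
          rw [tw_dw_append _ _ _ (by simpa using hc) hne]
      · -- non-digit char with a pending group: B emits cur and restarts.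
        rw [show numGroupsB (c :: rest) cur = cur :: numGroupsB rest [] from by
          simp [numGroupsB, hc, hcurn]]
        by_cases hrest : numGroupsB rest [] = []
        · have hall : ∀ a ∈ rest, PySem.Chars.isdigit a = false :=
            ((numGroupsB_eq_nil_iff rest []).1 hrest).2
          have hallP : ∀ a ∈ rest.reverse, (fun c => !PySem.Chars.isdigit c) a = true := by
            intro a ha; simp [hall a (by simpa using ha)]
          have hdwcur : cur.reverse.dropWhile (fun c => !PySem.Chars.isdigit c) = cur.reverse := by
            cases h : cur.reverse with
            | nil => simp
            | cons a t =>
              have ha : a ∈ cur := by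
                have : a ∈ cur.reverse := by simp [h]
                simpa using this
              simp [List.dropWhile_cons, hcur a ha]
          have htw : cur.reverse.takeWhile PySem.Chars.isdigit = cur.reverse := by
            rw [List.takeWhile_eq_self_iff]
            intro a ha
            exact hcur a (by simpa using ha)
          rw [List.reverse_cons, List.append_assoc, List.dropWhile_append]
          simp [List.dropWhile_eq_nil_iff.2 hallP, hrest, List.dropWhile_cons, hc, hdwcur, htw]
        · have hlast : (cur :: numGroupsB rest []).getLast? = (numGroupsB rest []).getLast? := by
            cases h : numGroupsB rest [] with
            | nil => exact absurd h hrest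
            | cons g gs => simp [List.getLast?_cons_cons]
          rw [hlast]
          have h := ih [] (by simp)
          simp only [List.reverse_nil, List.append_nil] at h
          rw [h]
          have hne : rest.reverse.dropWhile (fun c => !PySem.Chars.isdigit c) ≠ [] := by
            intro hdw
            have hall := List.dropWhile_eq_nil_iff.1 hdw
            exact hrest ((numGroupsB_eq_nil_iff rest []).2
              ⟨rfl, fun a ha => by simpa using hall a (by simpa using ha)⟩)
          rw [List.reverse_cons, List.append_assoc, List.singleton_append,
            tw_dw_append _ _ _ (by simpa using hc) hne]

-- ===== VERDICT (by name: the statement is the Claim_ definition above) =====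
theorem num_from_code_py_spec : Claim_equal_num_from_code_py := by
  intro code _
  unfold Spec_num_from_code_py num_from_code_py num_from_code_py_alt
  by_cases hemp : code = ""
  · simp [hemp]
  · simp only [hemp, if_false]
    set l := (PySem.Str.strip code).toList with hl
    have hA : numLoopA l.reverse [] =
        ((l.reverse.dropWhile (fun c => !PySem.Chars.isdigit c)).takeWhile
          PySem.Chars.isdigit).reverse := numLoopA_closed l.reverse
    have hB := numGroupsB_last l [] (by simp)
    simp only [List.reverse_nil, List.append_nil] at hB
    cases hgs : (numGroupsB l []).getLast? with
    | none =>
      have hnil : numGroupsB l [] = [] := List.getLast?_eq_none_iff.1 hgs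
      have hall := ((numGroupsB_eq_nil_iff l []).1 hnil).2
      have hdw : l.reverse.dropWhile (fun c => !PySem.Chars.isdigit c) = [] :=
        List.dropWhile_eq_nil_iff.2 (fun a ha => by simp [hall a (by simpa using ha)])
      simp [hA, hdw]
    | some g =>
      have hmem : g ∈ numGroupsB l [] := by
        cases h : numGroupsB l [] with
        | nil => rw [h] at hgs; simp at hgs
        | cons g' gs =>
          rw [h] at hgs
          have := List.getLast?_eq_some_iff.1 hgs
          rcases this with ⟨ys, hy⟩
          rw [← h] at hy ⊢
          rw [hy]; simp
      have hgne : g ≠ [] := numGroupsB_ne_nil l [] g hmem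
      have hdig : numLoopA l.reverse [] = g := by
        rw [hA, ← hB, hgs]; rfl
      simp [hdig, hgne]
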